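-- pv_equiv track=rewrite | github.com/BlueJ1/Kattis | 0-1_sequences.py | swaps
-- ===== SOURCE A (Python) =====
-- def swaps(zeros, ones):
--     n_swaps = 0
--     n_z = len(zeros)
--     for i in range(n_z):
--         n_swaps += zeros[i] - i
--     for i in range(len(ones)):
--         n_swaps += (n_z + i) - ones[i]
--
--     return n_swaps
-- ===== SOURCE B (Python) =====
-- def swaps(zeros, ones):
--     n_z = len(zeros)
--     m = len(ones)
--     return (sum(zeros) - n_z * (n_z - 1) // 2
--             + n_z * m + m * (m - 1) // 2 - sum(ones))
-- ===== Notes on version B (the rewrite author's own statement) =====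
-- stated objective: faster
-- what changed: Replaced both index loops by aggregate sums plus closed-form triangular-number index contributions.
import Mathlib
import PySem

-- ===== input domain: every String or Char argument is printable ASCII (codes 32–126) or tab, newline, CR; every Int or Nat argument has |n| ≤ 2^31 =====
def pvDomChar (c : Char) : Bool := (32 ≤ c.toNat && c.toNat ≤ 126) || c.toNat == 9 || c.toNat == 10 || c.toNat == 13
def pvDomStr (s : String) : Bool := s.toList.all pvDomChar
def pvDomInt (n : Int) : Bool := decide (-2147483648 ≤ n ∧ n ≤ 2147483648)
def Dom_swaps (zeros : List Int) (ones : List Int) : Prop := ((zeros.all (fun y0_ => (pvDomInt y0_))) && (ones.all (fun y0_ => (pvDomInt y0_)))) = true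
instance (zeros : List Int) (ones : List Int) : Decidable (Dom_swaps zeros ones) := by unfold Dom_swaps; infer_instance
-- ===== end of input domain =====

-- B replaces both per-index accumulation loops with aggregate sums plus closed-form triangular numbers (objective: faster, constant-factor).


-- ===== PORT A =====
def swaps (zeros : List Int) (ones : List Int) : Int :=
  let n_z : Int := zeros.length
  let s1 : Int := (PySem.List.pyRange 0 n_z 1).foldl
    (fun acc i => acc + (PySem.List.pyGetD zeros i 0 - i)) 0
  (PySem.List.pyRange 0 (ones.length : Int) 1).foldl
    (fun acc i => acc + ((n_z + i) - PySem.List.pyGetD ones i 0)) s1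

-- ===== PORT B =====
def swaps_alt (zeros : List Int) (ones : List Int) : Int :=
  let n_z : Int := zeros.length
  let m : Int := ones.length
  zeros.sum - PySem.Int.floordiv (n_z * (n_z - 1)) 2
    + n_z * m + PySem.Int.floordiv (m * (m - 1)) 2 - ones.sum

-- ===== PRECONDITION & SPEC =====
def Spec_swaps (zeros : List Int) (ones : List Int) (out : Int) : Prop := out = swaps_alt zeros ones
instance (zeros : List Int) (ones : List Int) (out : Int) : Decidable (Spec_swaps zeros ones out) := by unfold Spec_swaps; infer_instance

-- ===== CLAIM (what is proved, stated in full; the proofs are below) =====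
def Claim_equal_swaps : Prop := ∀ (zeros : List Int) (ones : List Int), Dom_swaps zeros ones → Spec_swaps zeros ones (swaps zeros ones)

-- ===== LEMMAS AND PROOFS =====

-- triangular number as Int
def pvTri : Nat → Int
  | 0 => 0
  | n + 1 => pvTri n + n

theorem pvTri_two_mul (n : Nat) : 2 * pvTri n = (n : Int) * ((n : Int) - 1) := by
  induction n with
  | zero => simp [pvTri]
  | succ k ih => simp [pvTri]; push_cast at ih ⊢; ring_nf at ih ⊢; omega

theorem floordiv_tri (n : Nat) :
    PySem.Int.floordiv ((n : Int) * ((n : Int) - 1)) 2 = pvTri n := by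
  rw [PySem.Int.floordiv_eq_ediv_of_pos (by omega), ← pvTri_two_mul n]
  omega

theorem loopA (xs : List Int) : ∀ (s acc : Int),
    (PySem.List.enumerate xs s).foldl (fun a p => a + (p.2 - p.1)) acc
    = acc + xs.sum - ((xs.length : Int) * s + pvTri xs.length) := by
  induction xs with
  | nil => intro s acc; simp [PySem.List.enumerate_nil, pvTri]
  | cons x t ih =>
      intro s acc
      rw [PySem.List.enumerate_cons, List.foldl_cons, ih (s + 1)]
      simp [pvTri]
      ring

theorem loopB (xs : List Int) : ∀ (c s acc : Int),
    (PySem.List.enumerate xs s).foldl (fun a p => a + ((c + p.1) - p.2)) acc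
    = acc + (xs.length : Int) * c + ((xs.length : Int) * s + pvTri xs.length) - xs.sum := by
  induction xs with
  | nil => intro c s acc; simp [PySem.List.enumerate_nil, pvTri]
  | cons x t ih =>
      intro c s acc
      rw [PySem.List.enumerate_cons, List.foldl_cons, ih c (s + 1)]
      simp [pvTri]
      ring

theorem range_fold_eq_enum (xs : List Int) (F : Int → Int → Int → Int) (init : Int) :
    (PySem.List.pyRange 0 (xs.length : Int) 1).foldl
        (fun acc i => F acc i (PySem.List.pyGetD xs i 0)) init
    = (PySem.List.enumerate xs 0).foldl (fun acc p => F acc p.1 p.2) init := by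
  rw [PySem.List.enumerate_eq_map_pyRange xs 0, List.foldl_map]
  simp [PySem.List.len_eq]

-- ===== VERDICT (by name: the statement is the Claim_ definition above) =====
theorem swaps_spec : Claim_equal_swaps := by
  intro zeros ones _
  simp only [Spec_swaps, swaps, swaps_alt]
  rw [range_fold_eq_enum zeros (fun a i v => a + (v - i)) 0,
      range_fold_eq_enum ones (fun a i v => a + (((zeros.length : Int) + i) - v)) _,
      loopA, loopB, floordiv_tri, floordiv_tri]
  ring
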